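-- pv_equiv track=rewrite | github.com/Abraxas1010/semi-algebraic-lean | scripts/cad_smt_solve.py | _tokenize_sexp
-- ===== SOURCE A (Python) =====
-- def _tokenize_sexp(s: str) -> list[str]:
--     tokens: list[str] = []
--     i = 0
--     while i < len(s):
--         c = s[i]
--         if c.isspace():
--             i += 1
--             continue
--         if c in ("(", ")"):
--             tokens.append(c)
--             i += 1
--             continue
--         j = i
--         while j < len(s) and (not s[j].isspace()) and s[j] not in ("(", ")"):
--             j += 1
--         tokens.append(s[i:j])
--         i = j
--     return tokens
-- ===== SOURCE B (Python) =====
-- def _tokenize_sexp(s: str) -> list[str]: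
--     return s.replace("(", " ( ").replace(")", " ) ").split()
-- ===== Notes on version B (the rewrite author's own statement) =====
-- stated objective: idiomatic
-- what changed: The manual index-based scanning loop (with an inner while that slices out each token) is replaced by padding every parenthesis with spaces via str.replace and then tokenizing with a single argument-less str.split().
import Mathlib
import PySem

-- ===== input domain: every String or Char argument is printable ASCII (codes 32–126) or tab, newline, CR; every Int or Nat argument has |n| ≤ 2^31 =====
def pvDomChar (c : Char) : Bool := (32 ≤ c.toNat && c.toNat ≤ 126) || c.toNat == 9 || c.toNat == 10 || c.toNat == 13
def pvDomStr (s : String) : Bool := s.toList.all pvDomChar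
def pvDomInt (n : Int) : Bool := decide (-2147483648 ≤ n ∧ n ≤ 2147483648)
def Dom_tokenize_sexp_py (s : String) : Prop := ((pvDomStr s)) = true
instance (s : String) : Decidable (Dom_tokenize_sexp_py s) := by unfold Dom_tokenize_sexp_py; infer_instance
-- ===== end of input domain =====

-- B replaces A's manual index-scanning loop by pad-the-parentheses-with-spaces then str.split():
-- simpler/idiomatic, same exact tokens.

-- ===== PORT A =====
-- A's inner 'while j < len(s) and ...' loop: splits off the longest prefix of
-- non-space, non-parenthesis characters (the rest of the current token).
def pvWordA : List Char → List Char × List Char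
  | [] => ([], [])
  | c :: cs =>
    if !(PySem.Chars.isspace c) && !(c == '(') && !(c == ')') then
      let p := pvWordA cs
      (c :: p.1, p.2)
    else ([], c :: cs)

-- needed by the port's termination proof
theorem pvWordA_len_le : ∀ (cs : List Char), (pvWordA cs).2.length ≤ cs.length := by
  intro cs
  induction cs with
  | nil => simp [pvWordA]
  | cons c t ih =>
    simp only [pvWordA]
    split
    · exact Nat.le_succ_of_le ih
    · simp

-- A's outer 'while i < len(s)' loop, as structural recursion over the remaining characters.
def tokenize_sexp_py_go : List Char → List String
  | [] => []
  | c :: cs =>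
    if PySem.Chars.isspace c then tokenize_sexp_py_go cs
    else if c == '(' || c == ')' then String.ofList [c] :: tokenize_sexp_py_go cs
    else
      -- tokens.append(s[i:j]); i = j   (the scanned word starts at c itself)
      String.ofList (c :: (pvWordA cs).1) :: tokenize_sexp_py_go (pvWordA cs).2
  termination_by cs => cs.length
  decreasing_by
    · simp
    · simp
    · exact Nat.lt_succ_of_le (pvWordA_len_le cs)

def tokenize_sexp_py (s : String) : List String := tokenize_sexp_py_go s.toList

-- ===== PORT B =====
def tokenize_sexp_py_alt (s : String) : List String :=
  PySem.Str.split₀ (PySem.Str.replace (PySem.Str.replace s "(" " ( ") ")" " ) ")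

-- ===== PRECONDITION & SPEC =====
def Spec_tokenize_sexp_py (s : String) (out : List String) : Prop := out = tokenize_sexp_py_alt s
instance (s : String) (out : List String) : Decidable (Spec_tokenize_sexp_py s out) := by unfold Spec_tokenize_sexp_py; infer_instance

-- ===== CLAIM (what is proved, stated in full; the proofs are below) =====
def Claim_equal_tokenize_sexp_py : Prop := ∀ (s : String), Dom_tokenize_sexp_py s → Spec_tokenize_sexp_py s (tokenize_sexp_py s)

-- ===== LEMMAS AND PROOFS =====

-- replacing a SINGLE-character pattern is a per-character expansion
theorem pv_replace_go_single (oc : Char) (new : List Char) :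
    ∀ (fuel : Nat) (l : List Char) (acc : List Char), l.length ≤ fuel →
      PySem.Chars.replace.go [oc] new fuel l acc
        = acc.reverse ++ l.flatMap (fun c => if c = oc then new else [c]) := by
  intro fuel
  induction fuel with
  | zero =>
    intro l acc h
    have hl : l = [] := List.length_eq_zero_iff.mp (Nat.le_zero.mp h)
    subst hl
    simp [PySem.Chars.replace.go]
  | succ n ih =>
    intro l acc h
    cases l with
    | nil => simp [PySem.Chars.replace.go]
    | cons c t =>
      simp only [PySem.Chars.replace.go]
      by_cases hc : c = oc
      · subst hc
        have hp : List.isPrefixOf [c] (c :: t) = true := by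
          simp [List.isPrefixOf]
        rw [if_pos hp]
        rw [ih _ _ (by simpa using Nat.le_of_succ_le_succ h)]
        simp
      · have hp : List.isPrefixOf [oc] (c :: t) = false := by
          simp [List.isPrefixOf]
          exact fun hcc => absurd hcc.symm hc
        rw [if_neg (by simp [hp])]
        rw [ih _ _ (by simpa using Nat.le_of_succ_le_succ h)]
        simp [hc]

theorem pv_replace_single (oc : Char) (new l : List Char) :
    PySem.Chars.replace l [oc] new = l.flatMap (fun c => if c = oc then new else [c]) := by
  simp only [PySem.Chars.replace, List.isEmpty_cons, Bool.false_eq_true, if_false]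
  exact pv_replace_go_single oc new l.length l [] le_rfl

-- what B's two replaces do to one character
def pvExpand (c : Char) : List Char :=
  if c = '(' then [' ', '(', ' '] else if c = ')' then [' ', ')', ' '] else [c]

theorem pv_two_replaces (l : List Char) :
    PySem.Chars.replace (PySem.Chars.replace l ['('] [' ', '(', ' ']) [')'] [' ', ')', ' ']
      = l.flatMap pvExpand := by
  rw [pv_replace_single, pv_replace_single, List.flatMap_assoc]
  apply List.flatMap_congr  -- pointwise equality of the two expansions
  intro c _
  by_cases h1 : c = '('
  · subst h1; rfl
  · by_cases h2 : c = ')'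
    · subst h2; rfl
    · simp [pvExpand, h1, h2]

def pvIsWord (c : Char) : Bool := !(PySem.Chars.isspace c) && !(c == '(') && !(c == ')')

def pvHeadNonWord : List Char → Prop
  | [] => True
  | c :: _ => pvIsWord c = false

theorem pvWordA_rest_head : ∀ (cs : List Char), pvHeadNonWord (pvWordA cs).2 := by
  intro cs
  induction cs with
  | nil => simp [pvWordA, pvHeadNonWord]
  | cons c t ih =>
    simp only [pvWordA]
    split
    · exact ih
    · next h => simpa [pvHeadNonWord, pvIsWord] using h

theorem pvIsWord_facts (c : Char) (h : pvIsWord c = true) :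
    PySem.Chars.isspace c = false ∧ c ≠ '(' ∧ c ≠ ')' := by
  simp only [pvIsWord, Bool.and_eq_true, Bool.not_eq_true'] at h
  exact ⟨h.1.1, by simpa using h.1.2, by simpa using h.2⟩

theorem pv_expand_word (c : Char) (h : pvIsWord c = true) : pvExpand c = [c] := by
  obtain ⟨_, h1, h2⟩ := pvIsWord_facts c h
  simp [pvExpand, h1, h2]

-- one step of split₀.go over a whitespace character
theorem pv_go_space_cons (c : Char) (hc : PySem.Chars.isspace c = true)
    (rest : List Char) (cur : List Char) (acc : List (List Char)) :
    PySem.Chars.split₀.go (c :: rest) cur acc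
      = PySem.Chars.split₀.go rest [] (if cur.isEmpty then acc else cur.reverse :: acc) := by
  simp only [PySem.Chars.split₀.go, hc, if_true]
  split <;> rfl

-- walking split₀.go through a maximal word: the word's characters land in cur (reversed)
theorem pv_go_word : ∀ (cs : List Char) (cur : List Char) (acc : List (List Char)),
    PySem.Chars.split₀.go (cs.flatMap pvExpand) cur acc
      = PySem.Chars.split₀.go ((pvWordA cs).2.flatMap pvExpand) ((pvWordA cs).1.reverse ++ cur) acc := by
  intro cs
  induction cs with
  | nil => simp [pvWordA]
  | cons c t ih =>
    intro cur acc
    simp only [pvWordA]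
    split
    · next h =>
      have hw : pvIsWord c = true := by simpa [pvIsWord] using h
      have hsp : PySem.Chars.isspace c = false := by
        simp only [pvIsWord, Bool.and_eq_true, Bool.not_eq_true'] at hw
        exact hw.1.1
      rw [List.flatMap_cons, pv_expand_word c hw]
      simp only [List.singleton_append, PySem.Chars.split₀.go, hsp, Bool.false_eq_true, if_false]
      rw [ih]
      simp
    · simp

-- main loop correspondence: split₀ over the expanded characters produces exactly A's tokens
theorem pv_go_main : ∀ (n : Nat) (cs : List Char), cs.length ≤ n →
    ∀ (cur : List Char) (acc : List (List Char)), (cur = [] ∨ pvHeadNonWord cs) →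
    PySem.Chars.split₀.go (cs.flatMap pvExpand) cur acc
      = acc.reverse ++ (if cur.isEmpty then [] else [cur.reverse])
          ++ (tokenize_sexp_py_go cs).map String.toList := by
  intro n
  induction n with
  | zero =>
    intro cs hn cur acc _
    have : cs = [] := List.length_eq_zero_iff.mp (Nat.le_zero.mp hn)
    subst this
    cases cur with
    | nil => simp [PySem.Chars.split₀.go, tokenize_sexp_py_go]
    | cons d ds => simp [PySem.Chars.split₀.go, tokenize_sexp_py_go]
  | succ n ih =>
    intro cs hn cur acc hcur
    cases cs with
    | nil =>
      cases cur with
      | nil => simp [PySem.Chars.split₀.go, tokenize_sexp_py_go]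
      | cons d ds => simp [PySem.Chars.split₀.go, tokenize_sexp_py_go]
    | cons c t =>
      have hn' : t.length ≤ n := Nat.le_of_succ_le_succ (by simpa using hn)
      by_cases hsp : PySem.Chars.isspace c = true
      · -- whitespace character: dropped by both sides (it cannot be a parenthesis)
        have h1 : c ≠ '(' := by intro h; rw [h] at hsp; exact absurd hsp (by decide)
        have h2 : c ≠ ')' := by intro h; rw [h] at hsp; exact absurd hsp (by decide)
        rw [List.flatMap_cons]
        simp only [pvExpand, h1, h2, if_false, List.singleton_append,
          PySem.Chars.split₀.go, hsp, if_true]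
        rw [show tokenize_sexp_py_go (c :: t) = tokenize_sexp_py_go t by
          simp [tokenize_sexp_py_go, hsp]]
        cases cur with
        | nil => exact ih t hn' [] acc (Or.inl rfl)
        | cons d ds =>
          rw [if_neg (by simp)]
          rw [ih t hn' [] ((d :: ds).reverse :: acc) (Or.inl rfl)]
          simp
      · by_cases hpar : (c == '(' || c == ')') = true
        · -- parenthesis: expanded to ' ' c ' ', becomes the single token [c]
          have hx : pvExpand c = [' ', c, ' '] := by
            rcases Bool.or_eq_true_iff.mp hpar with h | h
            · rw [eq_of_beq h]; rfl
            · rw [eq_of_beq h]; rfl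
          rw [List.flatMap_cons, hx]
          have hstep : ∀ (a : List (List Char)),
              PySem.Chars.split₀.go (c :: ' ' :: t.flatMap pvExpand) [] a
                = PySem.Chars.split₀.go (t.flatMap pvExpand) [] ([c] :: a) := by
            intro a
            simp only [PySem.Chars.split₀.go, hsp]
            simp [show PySem.Chars.isspace ' ' = true from by decide]
          rw [show tokenize_sexp_py_go (c :: t) = String.ofList [c] :: tokenize_sexp_py_go t by
            simp [tokenize_sexp_py_go, hsp, hpar]]
          simp only [List.cons_append, List.nil_append]
          rw [pv_go_space_cons ' ' (by decide), hstep]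
          cases cur with
          | nil =>
            rw [show (if ([] : List Char).isEmpty = true then acc else ([] : List Char).reverse :: acc) = acc from rfl,
                ih t hn' [] ([c] :: acc) (Or.inl rfl)]
            simp
          | cons d ds =>
            rw [show (if (d :: ds).isEmpty = true then acc else (d :: ds).reverse :: acc) = (d :: ds).reverse :: acc from rfl,
                ih t hn' [] ([c] :: (d :: ds).reverse :: acc) (Or.inl rfl)]
            simp
        · -- word character: cur must be empty (invariant), scan the whole word
          have hw : pvIsWord c = true := by
            simp [pvIsWord, hsp]
            simpa using hpar
          have hcur0 : cur = [] := by
            rcases hcur with h | h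
            · exact h
            · exact absurd h (by simp [pvHeadNonWord, hw])
          subst hcur0
          rw [List.flatMap_cons, pv_expand_word c hw]
          simp only [List.singleton_append, PySem.Chars.split₀.go, hsp, Bool.false_eq_true, if_false]
          rw [pv_go_word t [c] acc]
          have hlen : (pvWordA t).2.length ≤ n := le_trans (pvWordA_len_le t) hn'
          rw [ih (pvWordA t).2 hlen _ acc (Or.inr (pvWordA_rest_head t))]
          rw [show tokenize_sexp_py_go (c :: t)
              = String.ofList (c :: (pvWordA t).1) :: tokenize_sexp_py_go (pvWordA t).2 by
            simp only [tokenize_sexp_py_go, hsp, hpar]; simp]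
          simp

theorem pv_split_eq (cs : List Char) :
    PySem.Chars.split₀ (cs.flatMap pvExpand) = (tokenize_sexp_py_go cs).map String.toList := by
  unfold PySem.Chars.split₀
  rw [pv_go_main cs.length cs le_rfl [] [] (Or.inl rfl)]
  simp

-- ===== VERDICT (by name: the statement is the Claim_ definition above) =====
theorem tokenize_sexp_py_spec : Claim_equal_tokenize_sexp_py := by
  intro s _
  unfold Spec_tokenize_sexp_py tokenize_sexp_py_alt tokenize_sexp_py
  simp only [PySem.Str.replace, PySem.Str.split₀, String.toList_ofList]
  rw [show ("(" : String).toList = ['('] from rfl, show (")" : String).toList = [')'] from rfl,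
      show (" ( " : String).toList = [' ', '(', ' '] from rfl,
      show (" ) " : String).toList = [' ', ')', ' '] from rfl]
  rw [pv_two_replaces, pv_split_eq]
  simp [List.map_map, Function.comp_def]
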